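-- pv_equiv track=rewrite | github.com/ttaeram/APS | 2024.02.08_Stack_02/4869_Paper_attach/4869_Paper_attach.py | C_P
-- ===== SOURCE A (Python) =====
-- def C_P(line):
--     if line == 1:
--         return 1
--     if line == 2:
--         return 3
--     if line % 2 == 0:
--         return C_P(line - 2) * 4 - 1
--     elif line % 2 == 1:
--         return C_P(line -2) * 4 + 1
-- ===== SOURCE B (Python) =====
-- def C_P(line):
--     # closed-form geometric sums: f(2k+1) = (4**(k+1)-1)/3, f(2k) = (2*4**k+1)/3
--     if line % 2 == 1:
--         return (4 ** ((line + 1) // 2) - 1) // 3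
--     return (2 * 4 ** (line // 2) + 1) // 3
-- ===== Notes on version B (the rewrite author's own statement) =====
-- stated objective: faster
-- what changed: replaces the linear two-step recursion by the closed-form geometric-sum formula (4**((n+1)//2)-1)//3 for odd n and (2*4**(n//2)+1)//3 for even n
import Mathlib
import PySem

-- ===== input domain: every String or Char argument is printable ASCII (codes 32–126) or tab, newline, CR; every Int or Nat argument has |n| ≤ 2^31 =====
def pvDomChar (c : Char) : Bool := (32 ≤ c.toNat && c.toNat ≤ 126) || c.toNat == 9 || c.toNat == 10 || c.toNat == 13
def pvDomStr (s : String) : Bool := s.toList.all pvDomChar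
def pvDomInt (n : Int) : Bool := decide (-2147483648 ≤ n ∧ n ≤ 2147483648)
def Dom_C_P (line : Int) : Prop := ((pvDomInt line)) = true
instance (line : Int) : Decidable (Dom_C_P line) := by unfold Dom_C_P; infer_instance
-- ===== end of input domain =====

-- B replaces A's linear two-step recursion by a closed-form geometric-sum formula (objective: faster).
-- Pre_ restricts to line >= 1: for line <= 0 the Python A recurses without reaching a base case (RecursionError).


-- ===== PORT A =====
-- fuel-based transcription of A's recursion; fuel = line.toNat suffices for every line ≥ 1
-- (the 0-fuel / final-else defaults are unreachable under Pre_).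
def C_P_go : Nat → Int → Int
  | 0, _ => 0
  | Nat.succ f, line =>
    if line == 1 then 1
    else if line == 2 then 3
    else if PySem.Int.mod line 2 == 0 then C_P_go f (line - 2) * 4 - 1
    else if PySem.Int.mod line 2 == 1 then C_P_go f (line - 2) * 4 + 1
    else 0

def C_P (line : Int) : Int := C_P_go line.toNat line

-- ===== PORT B =====
-- exponent cast to Nat is exact: under Pre_ (line ≥ 1) both exponents are ≥ 0
def C_P_alt (line : Int) : Int :=
  if PySem.Int.mod line 2 == 1 then
    PySem.Int.floordiv (4 ^ (PySem.Int.floordiv (line + 1) 2).toNat - 1) 3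
  else
    PySem.Int.floordiv (2 * 4 ^ (PySem.Int.floordiv line 2).toNat + 1) 3

-- ===== PRECONDITION & SPEC =====
-- Pre_ excludes line ≤ 0, on which the Python A never reaches a base case and raises RecursionError.
def Pre_C_P (line : Int) : Prop := 1 ≤ line
instance (line : Int) : Decidable (Pre_C_P line) := by unfold Pre_C_P; infer_instance
def pvWitness_C_P : Int := 5

def Spec_C_P (line : Int) (out : Int) : Prop := out = C_P_alt line
instance (line : Int) (out : Int) : Decidable (Spec_C_P line out) := by unfold Spec_C_P; infer_instance

-- ===== CLAIM (what is proved, stated in full; the proofs are below) =====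
def Claim_equal_C_P : Prop := ∀ (line : Int), Dom_C_P line → Pre_C_P line → Spec_C_P line (C_P line)

-- ===== LEMMAS AND PROOFS =====

theorem pow4_mod3 : ∀ m : Nat, ∃ t : Int, (4:Int) ^ m = 3 * t + 1 := by
  intro m
  induction m with
  | zero => exact ⟨0, by norm_num⟩
  | succ k ih =>
    obtain ⟨t, ht⟩ := ih
    exact ⟨4 * t + 1, by rw [pow_succ, ht]; ring⟩

theorem alt_odd (line : Int) (_h1 : 1 ≤ line) (hodd : line % 2 = 1) :
    ∀ t : Int, (4:Int) ^ (((line + 1) / 2).toNat) = 3 * t + 1 →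
      C_P_alt line = t := by
  intro t ht
  unfold C_P_alt
  rw [PySem.Int.mod_eq_emod_of_pos (by norm_num), PySem.Int.floordiv_eq_ediv_of_pos (a := line + 1) (by norm_num), PySem.Int.floordiv_eq_ediv_of_pos (by norm_num)]
  simp only [hodd]
  rw [ht]
  norm_num

theorem alt_even (line : Int) (_h1 : 1 ≤ line) (heven : line % 2 = 0) :
    ∀ t : Int, (4:Int) ^ ((line / 2).toNat) = 3 * t + 1 →
      C_P_alt line = 2 * t + 1 := by
  intro t ht
  unfold C_P_alt
  rw [PySem.Int.mod_eq_emod_of_pos (by norm_num), PySem.Int.floordiv_eq_ediv_of_pos (a := line) (by norm_num)]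
  simp only [heven]
  norm_num
  rw [ht]
  omega

theorem go_eq_alt : ∀ (fuel : Nat) (line : Int), 1 ≤ line → line.toNat ≤ fuel →
    C_P_go fuel line = C_P_alt line := by
  intro fuel
  induction fuel with
  | zero => intro line h1 hf; omega
  | succ f ih =>
    intro line h1 hf
    by_cases e1 : line = 1
    · subst e1
      simp [C_P_go]
      obtain ⟨t, ht⟩ := pow4_mod3 (((1:Int) + 1) / 2).toNat
      rw [alt_odd 1 (by norm_num) (by norm_num) t ht]
      norm_num at ht
      omega
    · by_cases e2 : line = 2
      · subst e2
        simp [C_P_go]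
        obtain ⟨t, ht⟩ := pow4_mod3 (((2:Int)) / 2).toNat
        rw [alt_even 2 (by norm_num) (by norm_num) t ht]
        norm_num at ht
        omega
      · have h3 : 3 ≤ line := by
          rcases Int.emod_two_eq line with h | h <;> omega
        have hrec : C_P_go f (line - 2) = C_P_alt (line - 2) :=
          ih (line - 2) (by omega) (by omega)
        rcases Int.emod_two_eq line with h | h
        · -- even case
          have hgo : C_P_go (Nat.succ f) line = C_P_go f (line - 2) * 4 - 1 := by
            simp [C_P_go, h]
            omega
          obtain ⟨t, ht⟩ := pow4_mod3 (((line - 2) / 2).toNat)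
          have ht' : (4:Int) ^ ((line / 2).toNat) = 3 * (4 * t + 1) + 1 := by
            have hk : (line / 2).toNat = ((line - 2) / 2).toNat + 1 := by omega
            rw [hk, pow_succ, ht]; ring
          rw [hgo, hrec,
            alt_even (line - 2) (by omega) (by omega) t ht,
            alt_even line h1 h (4 * t + 1) ht']
          ring
        · -- odd case
          have hgo : C_P_go (Nat.succ f) line = C_P_go f (line - 2) * 4 + 1 := by
            simp [C_P_go, h]
            omega
          obtain ⟨t, ht⟩ := pow4_mod3 (((line - 2 + 1) / 2).toNat)
          have ht' : (4:Int) ^ (((line + 1) / 2).toNat) = 3 * (4 * t + 1) + 1 := by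
            have hk : ((line + 1) / 2).toNat = ((line - 2 + 1) / 2).toNat + 1 := by omega
            rw [hk, pow_succ, ht]; ring
          rw [hgo, hrec,
            alt_odd (line - 2) (by omega) (by omega) t ht,
            alt_odd line h1 h (4 * t + 1) ht']
          ring

-- ===== VERDICT (by name: the statement is the Claim_ definition above) =====
theorem C_P_spec : Claim_equal_C_P := by
  intro line _ hpre
  unfold Spec_C_P C_P
  exact go_eq_alt line.toNat line hpre (le_refl _)
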